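-- pv_equiv track=rewrite | github.com/dlfelps/semantic-extraction | factual_metrics.py | convert_tuple_format_to_factual
-- ===== SOURCE A (Python) =====
-- from typing import Dict, List, Set, Tuple
--
-- def convert_tuple_format_to_factual(extracted: List) -> Tuple[Set[str], Set[Tuple[str, str, str]], Set[Tuple[str, str, str]]]:
--     """
--     Convert Tuple Format (list of triplets) to FACTUAL format.
--
--     Args:
--         extracted: List of tuples [(subject, predicate, object), ...]
--
--     Returns:
--         Tuple of (entities, attribute_triplets, relationship_triplets)
--     """
--     entities = set()
--     attribute_triplets = set()
--     relationship_triplets = set()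
--     attribute_predicates = {"is", "are", "has", "have"}
--
--     for item in extracted:
--         if isinstance(item, (list, tuple)) and len(item) == 3:
--             subject, predicate, obj = item
--
--             # Add entities
--             entities.add(subject)
--
--             # Classify as attribute or relationship
--             if predicate.lower() in attribute_predicates:
--                 attribute_triplets.add((subject, "has_attribute", obj))
--                 # For attributes, object is the attribute value, not an entity
--             else:
--                 relationship_triplets.add((subject, predicate, obj))
--                 # For relationships, object is also an entity
--                 entities.add(obj)
--
--     return entities, attribute_triplets, relationship_triplets
-- ===== SOURCE B (Python) =====
-- def convert_tuple_format_to_factual(extracted):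
--     """Divide-and-conquer: split the list in half, classify each half
--     recursively, and merge the three result sets with set union."""
--     attribute_predicates = {"is", "are", "has", "have"}
--     items = list(extracted)
--
--     def go(lo, hi):
--         if hi - lo == 0:
--             return set(), set(), set()
--         if hi - lo == 1:
--             item = items[lo]
--             if not (isinstance(item, (list, tuple)) and len(item) == 3):
--                 return set(), set(), set()
--             subject, predicate, obj = item
--             if predicate.lower() in attribute_predicates:
--                 return {subject}, {(subject, "has_attribute", obj)}, set()
--             return {subject, obj}, set(), {(subject, predicate, obj)}
--         mid = (lo + hi) // 2
--         e1, a1, r1 = go(lo, mid)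
--         e2, a2, r2 = go(mid, hi)
--         return e1 | e2, a1 | a2, r1 | r2
--
--     return go(0, len(items))
-- ===== Notes on version B (the rewrite author's own statement) =====
-- stated objective: alternative
-- what changed: A's single left-to-right loop mutating three accumulator sets is replaced by a divide-and-conquer recursion that splits the list in half, classifies each half independently, and merges the three per-half result sets with set union.
import Mathlib
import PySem

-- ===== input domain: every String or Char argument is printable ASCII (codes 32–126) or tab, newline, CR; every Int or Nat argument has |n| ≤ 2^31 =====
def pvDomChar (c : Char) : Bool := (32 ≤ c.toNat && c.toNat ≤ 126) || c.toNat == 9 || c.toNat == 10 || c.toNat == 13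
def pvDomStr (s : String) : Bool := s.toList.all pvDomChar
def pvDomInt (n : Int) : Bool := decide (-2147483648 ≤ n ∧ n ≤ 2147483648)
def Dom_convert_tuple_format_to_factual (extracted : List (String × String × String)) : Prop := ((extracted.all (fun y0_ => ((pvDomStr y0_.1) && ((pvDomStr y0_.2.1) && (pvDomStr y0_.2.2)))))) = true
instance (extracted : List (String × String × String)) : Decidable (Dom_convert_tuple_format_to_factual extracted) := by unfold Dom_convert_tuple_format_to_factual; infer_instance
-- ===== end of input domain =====

-- B replaces A's single accumulating loop by a divide-and-conquer recursion: split the list in half, classify each half, merge the three result sets with set union (alternative decomposition; return value only).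
-- ===== PORT A =====
-- the set literal {"is","are","has","have"}; used only for membership tests
def pvAttrPreds : List String := ["is", "are", "has", "have"]

-- the body of A's loop (one iteration; the isinstance/len == 3 guard always holds on this typed input)
def pvStepA (st : List String × List (String × String × String) × List (String × String × String))
    (item : String × String × String) :
    List String × List (String × String × String) × List (String × String × String) :=
  let (entities, attribute_triplets, relationship_triplets) := st
  let (subject, predicate, obj) := item
  let entities := PySem.Set.add entities subject
  if PySem.Str.lower predicate ∈ pvAttrPreds then
    (entities, PySem.Set.add attribute_triplets (subject, "has_attribute", obj), relationship_triplets)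
  else
    (PySem.Set.add entities obj, attribute_triplets, PySem.Set.add relationship_triplets (subject, predicate, obj))

def convert_tuple_format_to_factual (extracted : List (String × String × String)) : List String × (List (String × String × String)) × (List (String × String × String)) :=
  extracted.foldl pvStepA (PySem.Set.empty, PySem.Set.empty, PySem.Set.empty)

-- ===== PORT B =====
-- base case of go: one item (the isinstance/len == 3 guard always holds on this typed input)
def pvBase (item : String × String × String) :
    List String × List (String × String × String) × List (String × String × String) :=
  let (subject, predicate, obj) := item
  if PySem.Str.lower predicate ∈ pvAttrPreds then
    (PySem.Set.ofList [subject], PySem.Set.ofList [(subject, "has_attribute", obj)], PySem.Set.empty)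
  else
    (PySem.Set.ofList [subject, obj], PySem.Set.empty, PySem.Set.ofList [(subject, predicate, obj)])

-- e1 | e2, a1 | a2, r1 | r2
def pvMerge (x y : List String × List (String × String × String) × List (String × String × String)) :
    List String × List (String × String × String) × List (String × String × String) :=
  (PySem.Set.union x.1 y.1, PySem.Set.union x.2.1 y.2.1, PySem.Set.union x.2.2 y.2.2)

-- go(lo, hi): ported as recursion on the sublist items[lo:hi]; mid = (lo+hi)//2 is the halving split
def pvGo : List (String × String × String) → List String × (List (String × String × String)) × (List (String × String × String))
  | [] => (PySem.Set.empty, PySem.Set.empty, PySem.Set.empty)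
  | [t] => pvBase t
  | a :: b :: rest =>
    let l := a :: b :: rest
    let mid := l.length / 2
    pvMerge (pvGo (l.take mid)) (pvGo (l.drop mid))
termination_by l => l.length
decreasing_by
  · simp [List.length_take]; omega
  · simp; omega

def convert_tuple_format_to_factual_alt (extracted : List (String × String × String)) : List String × (List (String × String × String)) × (List (String × String × String)) :=
  pvGo extracted

-- ===== PRECONDITION & SPEC =====
def Spec_convert_tuple_format_to_factual (extracted : List (String × String × String)) (out : List String × (List (String × String × String)) × (List (String × String × String))) : Prop := out = convert_tuple_format_to_factual_alt extracted
instance (extracted : List (String × String × String)) (out : List String × (List (String × String × String)) × (List (String × String × String))) : Decidable (Spec_convert_tuple_format_to_factual extracted out) := by unfold Spec_convert_tuple_format_to_factual; infer_instance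

-- ===== CLAIM =====
def Claim_equal_convert_tuple_format_to_factual : Prop := ∀ (extracted : List (String × String × String)), Dom_convert_tuple_format_to_factual extracted → Spec_convert_tuple_format_to_factual extracted (convert_tuple_format_to_factual extracted)

-- ===== LEMMAS AND PROOFS =====
-- the three output components of either program, as deduplicated comprehensions
def pvEnts (l : List (String × String × String)) : List String :=
  l.flatMap (fun t => if PySem.Str.lower t.2.1 ∈ pvAttrPreds then [t.1] else [t.1, t.2.2])
def pvAttrs (l : List (String × String × String)) : List (String × String × String) :=
  (l.filter (fun t => PySem.Str.lower t.2.1 ∈ pvAttrPreds)).map (fun t => (t.1, "has_attribute", t.2.2))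
def pvRels (l : List (String × String × String)) : List (String × String × String) :=
  l.filter (fun t => PySem.Str.lower t.2.1 ∉ pvAttrPreds)

-- A's fold, started from arbitrary accumulators, equals the comprehensions folded onto them.
theorem pv_fold_eq (l : List (String × String × String))
    (e : List String) (a r : List (String × String × String)) :
    l.foldl pvStepA (e, a, r)
    = ((pvEnts l).foldl PySem.Set.add e, (pvAttrs l).foldl PySem.Set.add a, (pvRels l).foldl PySem.Set.add r) := by
  induction l generalizing e a r with
  | nil => simp [pvEnts, pvAttrs, pvRels]
  | cons t l ih =>
    obtain ⟨s, p, o⟩ := t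
    rw [List.foldl_cons]
    simp only [pvStepA]
    by_cases h : PySem.Str.lower p ∈ pvAttrPreds
    · simp [h, ih, pvEnts, pvAttrs, pvRels]
    · simp [h, ih, pvEnts, pvAttrs, pvRels]

-- Set.update characterized: append the not-yet-present elements, in first-occurrence order.
theorem pv_update_eq {α : Type} [BEq α] [LawfulBEq α] (v : List α) (s : PySem.Set α) :
    PySem.Set.update s v = s ++ (PySem.Set.ofList v).filter (fun y => !(PySem.Set.contains s y)) := by
  induction v generalizing s with
  | nil => simp [PySem.Set.update, PySem.Set.ofList]
  | cons c v ih =>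
    have hcons : PySem.Set.update s (c :: v) = PySem.Set.update (PySem.Set.add s c) v := by
      simp [PySem.Set.update]
    rw [hcons, ih, PySem.Set.ofList_cons]
    by_cases hc : c ∈ s
    · rw [PySem.Set.add_of_mem hc]
      simp only [List.filter_cons]
      have : (!(PySem.Set.contains s c)) = false := by
        simp [hc]
      rw [this]
      simp only [PySem.Set.discard, List.filter_filter]
      congr 1
      apply List.filter_congr
      intro y _
      by_cases hy : y ∈ s
      · simp [hy]
      · have : y ≠ c := fun h => hy (h ▸ hc)
        simp [hy, this]
    · rw [PySem.Set.add_of_not_mem hc]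
      simp only [List.filter_cons]
      have : (!(PySem.Set.contains s c)) = true := by
        simp [hc]
      rw [this]
      simp only [PySem.Set.discard, List.filter_filter, List.append_assoc, List.singleton_append]
      congr 2
      apply List.filter_congr
      intro y _
      by_cases hy : y ∈ s
      · simp [hy, List.mem_append, PySem.Set.contains]
      · by_cases hyc : y = c
        · subst hyc
          simp [List.mem_append]
        · simp [hy, hyc, List.mem_append, PySem.Set.contains]

-- union of two set(…)s is the set of the concatenation
theorem pv_union_ofList {α : Type} [BEq α] [LawfulBEq α] (u v : List α) :
    PySem.Set.union (PySem.Set.ofList u) (PySem.Set.ofList v) = PySem.Set.ofList (u ++ v) := by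
  show PySem.Set.update (PySem.Set.ofList u) (PySem.Set.ofList v) = PySem.Set.ofList (u ++ v)
  rw [PySem.Set.ofList_append, pv_update_eq, pv_update_eq, PySem.Set.ofList_ofList]

-- B's divide-and-conquer computes set(pvEnts l), set(pvAttrs l), set(pvRels l)
theorem pv_go_eq (l : List (String × String × String)) :
    pvGo l = (PySem.Set.ofList (pvEnts l), PySem.Set.ofList (pvAttrs l), PySem.Set.ofList (pvRels l)) := by
  induction l using pvGo.induct with
  | case1 => simp [pvGo, pvEnts, pvAttrs, pvRels, PySem.Set.ofList, PySem.Set.empty]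
  | case2 t =>
    obtain ⟨s, p, o⟩ := t
    simp only [pvGo, pvBase]
    by_cases h : PySem.Str.lower p ∈ pvAttrPreds
    · simp [h, pvEnts, pvAttrs, pvRels, PySem.Set.empty, PySem.Set.ofList]
    · simp [h, pvEnts, pvAttrs, pvRels, PySem.Set.empty, PySem.Set.ofList]
  | case3 a b rest l mid ih1 ih2 =>
    rw [pvGo]
    rw [ih1, ih2]
    simp only [pvMerge]
    rw [pv_union_ofList, pv_union_ofList, pv_union_ofList]
    have h1 : pvEnts ((a :: b :: rest).take ((a :: b :: rest).length / 2)) ++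
              pvEnts ((a :: b :: rest).drop ((a :: b :: rest).length / 2)) = pvEnts (a :: b :: rest) := by
      simp [pvEnts, ← List.flatMap_append]
    have h2 : pvAttrs ((a :: b :: rest).take ((a :: b :: rest).length / 2)) ++
              pvAttrs ((a :: b :: rest).drop ((a :: b :: rest).length / 2)) = pvAttrs (a :: b :: rest) := by
      simp [pvAttrs, ← List.map_append, ← List.filter_append]
    have h3 : pvRels ((a :: b :: rest).take ((a :: b :: rest).length / 2)) ++
              pvRels ((a :: b :: rest).drop ((a :: b :: rest).length / 2)) = pvRels (a :: b :: rest) := by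
      simp [pvRels, ← List.filter_append]
    rw [h1, h2, h3]

-- ===== VERDICT =====
theorem convert_tuple_format_to_factual_spec : Claim_equal_convert_tuple_format_to_factual := by
  intro extracted _
  unfold Spec_convert_tuple_format_to_factual convert_tuple_format_to_factual convert_tuple_format_to_factual_alt
  rw [pv_fold_eq, pv_go_eq]
  rfl
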